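-- pv_equiv track=rewrite | github.com/ChrisE087/3D_cell_counting | 00-playground/get_balanced_dataset.py | split_cultivation_period
-- ===== SOURCE A (Python) =====
-- def split_cultivation_period(data_list):
--     # Split the files into cultivation period
--     data_list_24h = []
--     data_list_48h = []
--     data_list_72h = []
--
--     for element in filter(lambda element: '24h' in element, data_list):
--         data_list_24h.append(element)
--
--     for element in filter(lambda element: '48h' in element, data_list):
--         data_list_48h.append(element)
--
--     for element in filter(lambda element: '72h' in element, data_list):
--         data_list_72h.append(element)
--
--     return data_list_24h, data_list_48h, data_list_72h
-- ===== SOURCE B (Python) =====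
-- def split_cultivation_period(data_list):
--     # One pass: check all three markers independently for each element
--     data_list_24h = []
--     data_list_48h = []
--     data_list_72h = []
--     for element in data_list:
--         if '24h' in element:
--             data_list_24h.append(element)
--         if '48h' in element:
--             data_list_48h.append(element)
--         if '72h' in element:
--             data_list_72h.append(element)
--     return data_list_24h, data_list_48h, data_list_72h
-- ===== Notes on version B (the rewrite author's own statement) =====
-- stated objective: simpler
-- what changed: Replaces A's three sequential filter-scans of data_list with one partitioning pass that tests each element for all three markers independently (one traversal instead of three).
import Mathlib
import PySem

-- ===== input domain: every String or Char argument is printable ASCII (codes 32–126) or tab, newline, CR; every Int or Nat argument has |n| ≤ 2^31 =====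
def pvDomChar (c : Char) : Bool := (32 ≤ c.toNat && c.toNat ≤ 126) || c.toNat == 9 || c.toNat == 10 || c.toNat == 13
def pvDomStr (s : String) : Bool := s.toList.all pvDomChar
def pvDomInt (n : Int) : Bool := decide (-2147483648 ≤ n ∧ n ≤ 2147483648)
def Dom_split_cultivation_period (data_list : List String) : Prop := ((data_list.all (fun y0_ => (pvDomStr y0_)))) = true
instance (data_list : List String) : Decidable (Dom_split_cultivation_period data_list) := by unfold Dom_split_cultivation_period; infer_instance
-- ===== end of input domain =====

-- B: one partitioning pass with three independent membership tests instead of A's three filter-scans (simpler).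


-- ===== PORT A =====
-- literal port of A: three filter-loops, each appending into its own list
def split_cultivation_period (data_list : List String) : List String × List String × List String :=
  let l24 := (data_list.filter (fun e => PySem.Str.isIn "24h" e)).foldl (fun acc e => acc ++ [e]) []
  let l48 := (data_list.filter (fun e => PySem.Str.isIn "48h" e)).foldl (fun acc e => acc ++ [e]) []
  let l72 := (data_list.filter (fun e => PySem.Str.isIn "72h" e)).foldl (fun acc e => acc ++ [e]) []
  (l24, l48, l72)

-- ===== PORT B =====
-- port of B: one pass, three independent membership tests per element
def pvAltStep (st : List String × List String × List String) (e : String) :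
    List String × List String × List String :=
  let st := if PySem.Str.isIn "24h" e then (st.1 ++ [e], st.2.1, st.2.2) else st
  let st := if PySem.Str.isIn "48h" e then (st.1, st.2.1 ++ [e], st.2.2) else st
  if PySem.Str.isIn "72h" e then (st.1, st.2.1, st.2.2 ++ [e]) else st

def split_cultivation_period_alt (data_list : List String) : List String × List String × List String :=
  data_list.foldl pvAltStep ([], [], [])

-- ===== PRECONDITION & SPEC =====
def Spec_split_cultivation_period (data_list : List String) (out : List String × List String × List String) : Prop := out = split_cultivation_period_alt data_list
instance (data_list : List String) (out : List String × List String × List String) : Decidable (Spec_split_cultivation_period data_list out) := by unfold Spec_split_cultivation_period; infer_instance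

-- ===== CLAIM (what is proved, stated in full; the proofs are below) =====
def Claim_equal_split_cultivation_period : Prop := ∀ (data_list : List String), Dom_split_cultivation_period data_list → Spec_split_cultivation_period data_list (split_cultivation_period data_list)

-- ===== LEMMAS AND PROOFS =====

-- ===== VERDICT (by name: the statement is the Claim_ definition above) =====
theorem foldl_app_filter (p : String → Bool) (xs : List String) (acc : List String) :
    (xs.filter p).foldl (fun a e => a ++ [e]) acc = acc ++ xs.filter p := by
  induction xs generalizing acc with
  | nil => simp
  | cons x t ih =>
    by_cases h : p x <;> simp [List.filter_cons, h, ih]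

theorem alt_acc (xs : List String) (a b c : List String) :
    xs.foldl pvAltStep (a, b, c)
    = (a ++ xs.filter (fun e => PySem.Str.isIn "24h" e),
       b ++ xs.filter (fun e => PySem.Str.isIn "48h" e),
       c ++ xs.filter (fun e => PySem.Str.isIn "72h" e)) := by
  induction xs generalizing a b c with
  | nil => simp
  | cons x t ih =>
    simp only [List.foldl_cons, List.filter_cons]
    by_cases h1 : PySem.Chars.isIn ['2','4','h'] x.toList <;>
      by_cases h2 : PySem.Chars.isIn ['4','8','h'] x.toList <;>
        by_cases h3 : PySem.Chars.isIn ['7','2','h'] x.toList <;>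
          simp [pvAltStep, h1, h2, h3, ih]

theorem split_cultivation_period_spec : Claim_equal_split_cultivation_period := by
  intro data_list _
  unfold Spec_split_cultivation_period split_cultivation_period split_cultivation_period_alt
  rw [foldl_app_filter, foldl_app_filter, foldl_app_filter, alt_acc]
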